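-- pv_equiv track=rewrite | github.com/ferryfulei/javalearning | find.py | find
-- ===== SOURCE A (Python) =====
-- def find(a,b,sum):
--     if len(a) == len(b):
--         return sum
--     elif a[: len(b)] == b:
--         sum += 1
--         a = a[1:]
--         return find(a,b,sum)
--     elif  a[-len(b):] == b:
--         sum += 1
--         a = a[:-1]
--         return find(a,b,sum)
--     elif (a[0] == b[0] and a[-1] == b[-1]) or (a[0] == b[-1] and a[-1] == b[0]):
--         a = a[1:]
--         return find(a,b,sum)
--     else:
--         a = a[:-1]
--         return find(a,b,sum)
-- ===== SOURCE B (Python) =====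
-- def find(a, b, sum):
--     # Iterative: each trimming step shortens a by exactly one character, so the
--     # loop runs exactly len(a) - len(b) times; a counted for-loop replaces A's recursion.
--     total = sum
--     for _ in range(len(a) - len(b)):
--         if a.startswith(b):
--             total += 1
--             a = a[1:]
--         elif a.endswith(b):
--             total += 1
--             a = a[:-1]
--         elif (a[0] == b[0] and a[-1] == b[-1]) or (a[0] == b[-1] and a[-1] == b[0]):
--             a = a[1:]
--         else:
--             a = a[:-1]
--     return total
-- ===== Notes on version B (the rewrite author's own statement) =====
-- stated objective: simpler
-- what changed: Replaces A's recursion with a counted for-loop that runs exactly len(a)-len(b) times over a running total, using startswith/endswith for the slice comparisons.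
import Mathlib
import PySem

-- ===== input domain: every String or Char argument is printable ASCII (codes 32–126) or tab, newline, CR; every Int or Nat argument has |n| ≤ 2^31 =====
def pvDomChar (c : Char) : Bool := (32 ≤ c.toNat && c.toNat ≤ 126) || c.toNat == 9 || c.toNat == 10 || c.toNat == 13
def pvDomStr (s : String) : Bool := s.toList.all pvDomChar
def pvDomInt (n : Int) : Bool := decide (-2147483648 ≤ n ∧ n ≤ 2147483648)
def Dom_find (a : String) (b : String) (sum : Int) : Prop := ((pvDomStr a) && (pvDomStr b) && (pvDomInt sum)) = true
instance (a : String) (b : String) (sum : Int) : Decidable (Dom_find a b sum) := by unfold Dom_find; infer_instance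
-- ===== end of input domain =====

-- B replaces A's recursion with a counted for-loop (each step trims one char, so it
-- runs exactly len(a)-len(b) times); objective: simpler/idiomatic, same cost.
-- ===== PORT A =====
-- literal port of A's recursion on List Char; where Python raises IndexError
-- (a[0] / a[-1] on an empty string, outside Pre_) the port returns 0.
def findA (a b : List Char) (s : Int) : Int :=
  if a.length = b.length then s
  else if PySem.List.slice a none (some (b.length : Int)) = b then
    findA (PySem.List.slice a (some 1) none) b (s + 1)
  else if PySem.List.slice a (some (-(b.length : Int))) none = b then
    findA (PySem.List.slice a none (some (-1))) b (s + 1)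
  else
    match h0 : PySem.List.pyGet? a 0, hm : PySem.List.pyGet? a (-1),
          hb0 : PySem.List.pyGet? b 0, hbm : PySem.List.pyGet? b (-1) with
    | some a0, some am, some b0, some bm =>
      if (a0 = b0 ∧ am = bm) ∨ (a0 = bm ∧ am = b0) then
        findA (PySem.List.slice a (some 1) none) b s
      else
        findA (PySem.List.slice a none (some (-1))) b s
    | _, _, _, _ => 0
termination_by a.length
decreasing_by
  · rename_i hne hpre
    rcases a with _ | ⟨c, t⟩
    · exfalso; rw [PySem.List.slice_to_natCast] at hpre; simp at hpre; simp [hpre] at hne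
    · simp [PySem.List.slice_from_one]
  · rename_i hne hpre hsuf
    rcases a with _ | ⟨c, t⟩
    · exfalso; simp [PySem.List.slice] at hsuf; simp [hsuf] at hne
    · simp [PySem.List.slice_to_neg_one, List.length_dropLast]
  · rcases a with _ | ⟨c, t⟩
    · exfalso; simp [PySem.List.pyGet?] at h0
    · simp [PySem.List.slice_from_one]
  · rcases a with _ | ⟨c, t⟩
    · exfalso; simp [PySem.List.pyGet?] at h0
    · simp [PySem.List.slice_to_neg_one, List.length_dropLast]


def find (a : String) (b : String) (sum : Int) : Int :=
  findA a.toList b.toList sum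

-- ===== PORT B =====
-- one loop-body step of B (the loop never indexes out of range, so pyGetD's
-- default ' ' is never the value used on any input)
def stepB (b : List Char) (st : List Char × Int) : List Char × Int :=
  if PySem.Chars.startswith st.1 b then
    (PySem.List.slice st.1 (some 1) none, st.2 + 1)
  else if PySem.Chars.endswith st.1 b then
    (PySem.List.slice st.1 none (some (-1)), st.2 + 1)
  else if (PySem.List.pyGetD st.1 0 ' ' = PySem.List.pyGetD b 0 ' ' ∧
           PySem.List.pyGetD st.1 (-1) ' ' = PySem.List.pyGetD b (-1) ' ') ∨
          (PySem.List.pyGetD st.1 0 ' ' = PySem.List.pyGetD b (-1) ' ' ∧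
           PySem.List.pyGetD st.1 (-1) ' ' = PySem.List.pyGetD b 0 ' ') then
    (PySem.List.slice st.1 (some 1) none, st.2)
  else
    (PySem.List.slice st.1 none (some (-1)), st.2)

def find_alt (a : String) (b : String) (sum : Int) : Int :=
  ((PySem.List.pyRange 0 ((a.toList.length : Int) - (b.toList.length : Int)) 1).foldl
    (fun st _ => stepB b.toList st) (a.toList, sum)).2

-- ===== PRECONDITION & SPEC =====
-- Pre_ excludes len(a) < len(b): A trims a down to the empty string and then
-- raises IndexError on a[0]; B's loop body never runs there and it returns sum.
def Pre_find (a : String) (b : String) (_sum : Int) : Prop :=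
  b.toList.length ≤ a.toList.length
instance (a : String) (b : String) (sum : Int) : Decidable (Pre_find a b sum) := by
  unfold Pre_find; infer_instance

def pvWitness_find : String × String × Int := ("ab", "b", 0)

def Spec_find (a : String) (b : String) (sum : Int) (out : Int) : Prop := out = find_alt a b sum
instance (a : String) (b : String) (sum : Int) (out : Int) : Decidable (Spec_find a b sum out) := by unfold Spec_find; infer_instance

-- ===== CLAIM (what is proved, stated in full; the proofs are below) =====
def Claim_equal_find : Prop := ∀ (a : String) (b : String) (sum : Int), Dom_find a b sum → Pre_find a b sum → Spec_find a b sum (find a b sum)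
-- ===== LEMMAS AND PROOFS =====

-- a fold over any list with a body that ignores the element is function iteration
theorem foldl_const_iterate {α β : Type} (g : β → β) (l : List α) (init : β) :
    l.foldl (fun st _ => g st) init = g^[l.length] init := by
  induction l generalizing init with
  | nil => rfl
  | cons x t ih => simp [List.foldl_cons, ih, Function.iterate_succ_apply]

-- one step of A equals one step of B, and it shortens a by exactly one
theorem findA_step (a b : List Char) (s : Int) (h : b.length < a.length) :
    findA a b s = findA (stepB b (a, s)).1 b (stepB b (a, s)).2 ∧
    (stepB b (a, s)).1.length + 1 = a.length := by
  have hne : a.length ≠ b.length := by omega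
  have ha : a ≠ [] := by intro h'; subst h'; simp at h
  have htail : (PySem.List.slice a (some 1) none).length + 1 = a.length := by
    rw [PySem.List.slice_from_one]
    have := List.length_pos_iff.mpr ha
    simp; omega
  have hlast : (PySem.List.slice a none (some (-1))).length + 1 = a.length := by
    rw [PySem.List.slice_to_neg_one, List.length_dropLast]
    have := List.length_pos_iff.mpr ha
    omega
  by_cases hpre : PySem.List.slice a none (some (b.length : Int)) = b
  · -- prefix branch
    have hsw : PySem.Chars.startswith a b = true := by
      rw [PySem.Chars.startswith_iff]
      rw [PySem.List.slice_to_natCast] at hpre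
      exact hpre ▸ List.take_prefix b.length a
    have hst : stepB b (a, s) = (PySem.List.slice a (some 1) none, s + 1) := by
      simp [stepB, hsw]
    rw [hst]
    refine ⟨?_, htail⟩
    rw [findA]
    simp only [if_neg hne, if_pos hpre]
  · have hb : b ≠ [] := by
      intro h'; subst h'
      exact hpre (by rw [PySem.List.slice_to_natCast]; simp)
    have hbpos : 0 < b.length := List.length_pos_iff.mpr hb
    have hsw : PySem.Chars.startswith a b = false := by
      rw [Bool.eq_false_iff]
      intro hc
      rw [PySem.Chars.startswith_iff] at hc
      apply hpre
      rw [PySem.List.slice_to_natCast]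
      obtain ⟨t, rfl⟩ := hc
      simp
    by_cases hsuf : PySem.List.slice a (some (-(b.length : Int))) none = b
    · -- suffix branch
      have hew : PySem.Chars.endswith a b = true := by
        rw [PySem.Chars.endswith_iff]
        rw [PySem.List.slice_from_neg_natCast a b.length hbpos] at hsuf
        exact hsuf ▸ (List.drop_suffix _ a)
      have hst : stepB b (a, s) = (PySem.List.slice a none (some (-1)), s + 1) := by
        simp [stepB, hsw, hew]
      rw [hst]
      refine ⟨?_, hlast⟩
      rw [findA]
      simp only [if_neg hne, if_neg hpre, if_pos hsuf]
    · have hew : PySem.Chars.endswith a b = false := by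
        rw [Bool.eq_false_iff]
        intro hc
        rw [PySem.Chars.endswith_iff] at hc
        apply hsuf
        rw [PySem.List.slice_from_neg_natCast a b.length hbpos]
        obtain ⟨t, rfl⟩ := hc
        simp
      -- a and b both nonempty: the four pyGet? succeed with the pyGetD values
      have ha0 : PySem.List.pyGet? a 0 = some (PySem.List.pyGetD a 0 ' ') := by
        cases a with
        | nil => exact absurd rfl ha
        | cons c t => simp [PySem.List.pyGetD_zero_cons]
      have ham : PySem.List.pyGet? a (-1) = some (PySem.List.pyGetD a (-1) ' ') := by
        rw [PySem.List.pyGet?_neg_one, PySem.List.pyGetD_neg_one a ' ' ha,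
          List.getLast?_eq_some_getLast ha]
      have hb0 : PySem.List.pyGet? b 0 = some (PySem.List.pyGetD b 0 ' ') := by
        cases b with
        | nil => exact absurd rfl hb
        | cons c t => simp [PySem.List.pyGetD_zero_cons]
      have hbm : PySem.List.pyGet? b (-1) = some (PySem.List.pyGetD b (-1) ' ') := by
        rw [PySem.List.pyGet?_neg_one, PySem.List.pyGetD_neg_one b ' ' hb,
          List.getLast?_eq_some_getLast hb]
      by_cases hcond : (PySem.List.pyGetD a 0 ' ' = PySem.List.pyGetD b 0 ' ' ∧
           PySem.List.pyGetD a (-1) ' ' = PySem.List.pyGetD b (-1) ' ') ∨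
          (PySem.List.pyGetD a 0 ' ' = PySem.List.pyGetD b (-1) ' ' ∧
           PySem.List.pyGetD a (-1) ' ' = PySem.List.pyGetD b 0 ' ')
      · have hst : stepB b (a, s) = (PySem.List.slice a (some 1) none, s) := by
          simp only [stepB, hsw, hew, Bool.false_eq_true, if_false, if_pos hcond]
        rw [hst]
        refine ⟨?_, htail⟩
        rw [findA]
        simp only [if_neg hne, if_neg hpre, if_neg hsuf]
        split
        · rename_i e0 em e1 e2
          rw [ha0] at e0; injection e0 with e0; subst e0
          rw [ham] at em; injection em with em; subst em
          rw [hb0] at e1; injection e1 with e1; subst e1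
          rw [hbm] at e2; injection e2 with e2; subst e2
          rw [if_pos hcond]
        · rename_i hfalse
          exact (hfalse _ _ _ _ ha0 ham hb0 hbm).elim
      · have hst : stepB b (a, s) = (PySem.List.slice a none (some (-1)), s) := by
          simp only [stepB, hsw, hew, Bool.false_eq_true, if_false, if_neg hcond]
        rw [hst]
        refine ⟨?_, hlast⟩
        rw [findA]
        simp only [if_neg hne, if_neg hpre, if_neg hsuf]
        split
        · rename_i e0 em e1 e2
          rw [ha0] at e0; injection e0 with e0; subst e0
          rw [ham] at em; injection em with em; subst em
          rw [hb0] at e1; injection e1 with e1; subst e1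
          rw [hbm] at e2; injection e2 with e2; subst e2
          rw [if_neg hcond]
        · rename_i hfalse
          exact (hfalse _ _ _ _ ha0 ham hb0 hbm).elim

-- A equals n iterated B-steps when a is exactly n longer than b
theorem findA_iterate (b : List Char) (n : Nat) :
    ∀ (a : List Char) (s : Int), a.length = b.length + n →
      findA a b s = ((stepB b)^[n] (a, s)).2 := by
  induction n with
  | zero =>
    intro a s hlen
    rw [findA]
    simp [hlen]
  | succ n ih =>
    intro a s hlen
    obtain ⟨hstep, hl⟩ := findA_step a b s (by omega)
    rw [hstep, Function.iterate_succ_apply]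
    exact ih _ _ (by omega)

-- ===== VERDICT (by name: the statement is the Claim_ definition above) =====
theorem find_spec : Claim_equal_find := by
  intro a b sum _ hpre
  unfold Spec_find find find_alt
  set la := a.toList with hla
  set lb := b.toList with hlb
  have hpre' : lb.length ≤ la.length := hpre
  rw [foldl_const_iterate]
  have hrange : (PySem.List.pyRange 0 ((la.length : Int) - (lb.length : Int)) 1).length
      = la.length - lb.length := by
    have : (la.length : Int) - (lb.length : Int) = ((la.length - lb.length : Nat) : Int) := by
      omega
    rw [this, PySem.List.pyRange_zero_natCast]
    simp
  rw [hrange]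
  exact findA_iterate lb (la.length - lb.length) la sum (by omega)
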